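-- pv_equiv track=rewrite | github.com/pypi-data/pypi-mirror-47 | packages/lexed/lexed-0.0.1.10-py3-none-any.whl/lexed/line.py | num_left_of
-- ===== SOURCE A (Python) =====
-- def num_left_of(text, position):
--     """Function to compare position of number with other character"""
--     flag = True
--     if '[' not in text and '(' not in text and ':' not in text and ',' not in text and \
--             ';' not in text and '=' not in text and '+' not in text and '-' not in text and \
--             '*' not in text and '/' not in text and '%' not in text:
--         return False
--
--     for char in '[(:,;+-*/%=':
--         if char in text:
--             char_pos = text.rfind(char)
--             if position <= char_pos:
--                 flag = False
--                 continue
--             flag = True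
--             for i in range(char_pos, position):
--                 if text[i].isalpha():
--                     flag = False
--     return flag
-- ===== SOURCE B (Python) =====
-- def num_left_of(text, position):
--     """Function to compare position of number with other character"""
--     last = {}
--     last_alpha = -1
--     for i, ch in enumerate(text):
--         if ch in '[(:,;+-*/%=':
--             last[ch] = i
--         if i < position and ch.isalpha():
--             last_alpha = i
--     sep_pos = -1
--     for ch in '[(:,;+-*/%=':
--         if ch in last:
--             sep_pos = last[ch]
--     return sep_pos < position and last_alpha < sep_pos
-- ===== Notes on version B (the rewrite author's own statement) =====
-- stated objective: alternative
-- what changed: A runs, for each of the 11 separators present in text, an rfind plus a full alpha-scan of range(char_pos, position); B makes ONE indexing pass over enumerate(text) that records the last index of each separator in a dict and the last alphabetic index left of position, then answers with two constant-time comparisons (sep_pos < position and last_alpha < sep_pos) without any rfind or slice scan.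
import Mathlib
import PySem

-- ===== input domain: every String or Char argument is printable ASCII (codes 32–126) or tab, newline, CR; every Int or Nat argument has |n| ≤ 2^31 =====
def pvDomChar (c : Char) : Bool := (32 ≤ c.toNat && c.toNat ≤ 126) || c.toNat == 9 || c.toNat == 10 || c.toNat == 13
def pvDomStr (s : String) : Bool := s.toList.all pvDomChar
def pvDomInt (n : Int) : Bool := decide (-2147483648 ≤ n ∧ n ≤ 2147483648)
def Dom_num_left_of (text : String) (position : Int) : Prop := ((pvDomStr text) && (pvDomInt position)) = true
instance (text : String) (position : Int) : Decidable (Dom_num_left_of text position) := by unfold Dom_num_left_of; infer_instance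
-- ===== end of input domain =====

-- B replaces A's per-separator rfind + alpha-scans by ONE indexing pass over enumerate(text)
-- (a dict of last separator indices and the last alpha index left of position), answering with
-- two comparisons. Objective: alternative (different algorithm, similar cost).


-- ===== PORT A =====
-- the separator string '[(:,;+-*/%=' both Pythons iterate over
def pvSeps : List Char := ['[', '(', ':', ',', ';', '+', '-', '*', '/', '%', '=']

-- body of A's 'if char in text:' branch: char_pos = text.rfind(char); the position test; the index loop
-- (text[i] is ported with pyGetD; its default is never read on inputs admitted by Pre_num_left_of)
def pvAStep (text : String) (position : Int) (c : Char) : Bool :=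
  -- char_pos = text.rfind(char)
  if position ≤ PySem.Str.rfind text (String.ofList [c]) then false
  else
    (PySem.List.pyRange (PySem.Str.rfind text (String.ofList [c])) position 1).foldl
      (fun flag i => if PySem.Chars.isalpha (PySem.List.pyGetD text.toList i ' ') then false else flag)
      true

def num_left_of (text : String) (position : Int) : Bool :=
  if !PySem.Str.isIn "[" text && !PySem.Str.isIn "(" text && !PySem.Str.isIn ":" text &&
     !PySem.Str.isIn "," text && !PySem.Str.isIn ";" text && !PySem.Str.isIn "=" text &&
     !PySem.Str.isIn "+" text && !PySem.Str.isIn "-" text && !PySem.Str.isIn "*" text &&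
     !PySem.Str.isIn "/" text && !PySem.Str.isIn "%" text then false
  else
    pvSeps.foldl
      (fun flag c => if PySem.Str.isIn (String.ofList [c]) text then pvAStep text position c else flag)
      true

-- ===== PORT B =====
-- the body of B's single 'for i, ch in enumerate(text):' loop; state = (last : dict, last_alpha : int)
def pvBStep (position : Int) (st : PySem.Dict Char Int × Int) (p : Int × Char) :
    PySem.Dict Char Int × Int :=
  -- if ch in '[(:,;+-*/%=': last[ch] = i
  let st1 := if PySem.Str.isIn (String.ofList [p.2]) "[(:,;+-*/%=" then (st.1.insert p.2 p.1, st.2) else st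
  -- if i < position and ch.isalpha(): last_alpha = i
  if decide (p.1 < position) && PySem.Chars.isalpha p.2 then (st1.1, p.1) else st1

def num_left_of_alt (text : String) (position : Int) : Bool :=
  let st := (PySem.List.enumerate text.toList 0).foldl (pvBStep position) (PySem.Dict.empty, -1)
  -- for ch in '[(:,;+-*/%=': if ch in last: sep_pos = last[ch]
  let sep_pos := pvSeps.foldl
    (fun acc c => match st.1.get? c with | some v => v | none => acc) (-1 : Int)
  decide (sep_pos < position) && decide (st.2 < sep_pos)

-- ===== PRECONDITION & SPEC =====
-- Pre_ excludes exactly the inputs where A raises IndexError: a separator occurs in text and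
-- position > len(text), so A's inner loop 'for i in range(char_pos, position)' reads past the end.
def Pre_num_left_of (text : String) (position : Int) : Prop :=
  position ≤ (text.toList.length : Int) ∨ ∀ c ∈ pvSeps, c ∉ text.toList
instance (text : String) (position : Int) : Decidable (Pre_num_left_of text position) := by
  unfold Pre_num_left_of; infer_instance

def pvWitness_num_left_of : String × Int := ("a+b", 2)

def Spec_num_left_of (text : String) (position : Int) (out : Bool) : Prop := out = num_left_of_alt text position
instance (text : String) (position : Int) (out : Bool) : Decidable (Spec_num_left_of text position out) := by unfold Spec_num_left_of; infer_instance

-- ===== CLAIM (what is proved, stated in full; the proofs are below) =====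
def Claim_equal_num_left_of : Prop := ∀ (text : String) (position : Int), Dom_num_left_of text position → Pre_num_left_of text position → Spec_num_left_of text position (num_left_of text position)

-- ===== LEMMAS AND PROOFS =====

-- the two components of B's loop state evolve independently
def pvDStep (d : PySem.Dict Char Int) (p : Int × Char) : PySem.Dict Char Int :=
  if PySem.Str.isIn (String.ofList [p.2]) "[(:,;+-*/%=" then d.insert p.2 p.1 else d
def pvLStep (position : Int) (la : Int) (p : Int × Char) : Int :=
  if decide (p.1 < position) && PySem.Chars.isalpha p.2 then p.1 else la

lemma pv_fold_pair (position : Int) (l : List (Int × Char)) (d0 : PySem.Dict Char Int) (a0 : Int) :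
    l.foldl (pvBStep position) (d0, a0) = (l.foldl pvDStep d0, l.foldl (pvLStep position) a0) := by
  induction l generalizing d0 a0 with
  | nil => rfl
  | cons x xs ih =>
    have hstep : pvBStep position (d0, a0) x = (pvDStep d0 x, pvLStep position a0 x) := by
      unfold pvBStep pvDStep pvLStep; split_ifs <;> rfl
    rw [List.foldl_cons, hstep, ih, List.foldl_cons, List.foldl_cons]

-- single-character 'c in text' is membership in text.toList
lemma pv_isIn_singleton (text : String) (c : Char) :
    PySem.Str.isIn (String.ofList [c]) text = true ↔ c ∈ text.toList := by
  rw [PySem.Str.isIn_iff_infix]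
  simp only [String.toList_ofList]
  constructor
  · intro h; exact h.subset (by simp)
  · intro h
    obtain ⟨l1, l2, heq⟩ := List.append_of_mem h
    rw [heq]
    exact ⟨l1, l2, by simp⟩

-- membership in the separator string is membership in pvSeps
lemma pv_isIn_seps (c : Char) :
    PySem.Str.isIn (String.ofList [c]) "[(:,;+-*/%=" = decide (c ∈ pvSeps) := by
  have h := pv_isIn_singleton "[(:,;+-*/%=" c
  have ht : ("[(:,;+-*/%=" : String).toList = pvSeps := by decide
  rw [ht] at h
  by_cases hm : c ∈ pvSeps
  · rw [h.mpr hm, decide_eq_true hm]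
  · rw [decide_eq_false hm]
    rw [Bool.eq_false_iff]
    intro hc
    exact hm (h.mp hc)

lemma pv_dstep_eq (d : PySem.Dict Char Int) (i : Int) (x : Char) :
    pvDStep d (i, x) = if x ∈ pvSeps then d.insert x i else d := by
  unfold pvDStep
  dsimp only
  rw [pv_isIn_seps]
  by_cases h : x ∈ pvSeps
  · rw [if_pos (decide_eq_true h), if_pos h]
  · rw [if_neg (by simp [h]), if_neg h]

lemma pv_lstep_eq (position : Int) (la : Int) (i : Int) (x : Char) :
    pvLStep position la (i, x) = if i < position ∧ PySem.Chars.isalpha x = true then i else la := by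
  unfold pvLStep
  dsimp only
  by_cases h : i < position ∧ PySem.Chars.isalpha x = true
  · rw [if_pos (by simp [h.1, h.2]), if_pos h]
  · rw [if_neg (by simp only [Bool.and_eq_true, decide_eq_true_eq]; exact h), if_neg h]

-- after the pass, the dict holds, for each separator, the index of its LAST occurrence
lemma pv_dict_spec (s : List Char) (c : Char) (hc : c ∈ pvSeps) :
    (((PySem.List.enumerate s 0).foldl pvDStep PySem.Dict.empty).get? c = none ∧ c ∉ s) ∨
    (∃ j : Nat, ((PySem.List.enumerate s 0).foldl pvDStep PySem.Dict.empty).get? c = some (j : Int) ∧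
      ∃ hj : j < s.length, s[j] = c ∧ ∀ l, (hl : l < s.length) → j < l → s[l] ≠ c) := by
  induction s using List.reverseRecOn with
  | nil => left; exact ⟨PySem.Dict.get?_empty _, by simp⟩
  | append_singleton s x ih =>
    have henum : PySem.List.enumerate (s ++ [x]) 0 = PySem.List.enumerate s 0 ++ [((s.length : Int), x)] := by
      rw [PySem.List.enumerate_append, PySem.List.enumerate_cons, PySem.List.enumerate_nil]
      simp
    rw [henum, List.foldl_append, List.foldl_cons, List.foldl_nil, pv_dstep_eq]
    by_cases hx : x ∈ pvSeps
    · rw [if_pos hx]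
      by_cases hcx : c = x
      · subst hcx
        right
        refine ⟨s.length, PySem.Dict.get?_insert_self _ _ _, by simp, by simp, ?_⟩
        intro l hl hgt
        simp only [List.length_append, List.length_cons, List.length_nil] at hl
        omega
      · rw [PySem.Dict.get?_insert_of_ne _ _ hcx]
        rcases ih with ⟨hn, hnm⟩ | ⟨j, hj, hjl, hget, hmax⟩
        · left; exact ⟨hn, by simp [hnm, hcx]⟩
        · right
          refine ⟨j, hj, by simp; omega, ?_, ?_⟩
          · rw [List.getElem_append_left hjl]; exact hget
          · intro l hl hgt
            simp only [List.length_append, List.length_cons, List.length_nil] at hl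
            by_cases hls : l < s.length
            · rw [List.getElem_append_left hls]; exact hmax l hls hgt
            · have : l = s.length := by omega
              subst this
              rw [List.getElem_concat_length rfl]
              exact fun h => hcx h.symm
    · rw [if_neg hx]
      have hcx : c ≠ x := fun h => hx (h ▸ hc)
      rcases ih with ⟨hn, hnm⟩ | ⟨j, hj, hjl, hget, hmax⟩
      · left; exact ⟨hn, by simp [hnm, hcx]⟩
      · right
        refine ⟨j, hj, by simp; omega, ?_, ?_⟩
        · rw [List.getElem_append_left hjl]; exact hget
        · intro l hl hgt
          simp only [List.length_append, List.length_cons, List.length_nil] at hl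
          by_cases hls : l < s.length
          · rw [List.getElem_append_left hls]; exact hmax l hls hgt
          · have : l = s.length := by omega
            subst this
            rw [List.getElem_concat_length rfl]
            exact fun h => hcx h.symm

-- after the pass, last_alpha is the last alphabetic index left of position (or -1)
lemma pv_la_spec (s : List Char) (position : Int) :
    ((PySem.List.enumerate s 0).foldl (pvLStep position) (-1) = -1 ∧
      ∀ j, (hj : j < s.length) → (j : Int) < position → PySem.Chars.isalpha s[j] = false) ∨
    (∃ j : Nat, (PySem.List.enumerate s 0).foldl (pvLStep position) (-1) = (j : Int) ∧
      ∃ hj : j < s.length, (j : Int) < position ∧ PySem.Chars.isalpha s[j] = true ∧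
        ∀ l, (hl : l < s.length) → j < l → (l : Int) < position → PySem.Chars.isalpha s[l] = false) := by
  induction s using List.reverseRecOn with
  | nil => left; exact ⟨rfl, by simp⟩
  | append_singleton s x ih =>
    have henum : PySem.List.enumerate (s ++ [x]) 0 = PySem.List.enumerate s 0 ++ [((s.length : Int), x)] := by
      rw [PySem.List.enumerate_append, PySem.List.enumerate_cons, PySem.List.enumerate_nil]
      simp
    rw [henum, List.foldl_append, List.foldl_cons, List.foldl_nil, pv_lstep_eq]
    by_cases hnew : (s.length : Int) < position ∧ PySem.Chars.isalpha x = true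
    · rw [if_pos hnew]
      right
      refine ⟨s.length, rfl, by simp, hnew.1, by simp [hnew.2], ?_⟩
      intro l hl hgt _
      simp only [List.length_append, List.length_cons, List.length_nil] at hl
      omega
    · rw [if_neg hnew]
      rcases ih with ⟨hn, hall⟩ | ⟨j, hj, hjl, hjpos, hjal, hmax⟩
      · left
        refine ⟨hn, ?_⟩
        intro j hj hjpos
        simp only [List.length_append, List.length_cons, List.length_nil] at hj
        by_cases hjs : j < s.length
        · rw [List.getElem_append_left hjs]; exact hall j hjs hjpos
        · have : j = s.length := by omega
          subst this
          rw [List.getElem_concat_length rfl]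
          rcases Decidable.not_and_iff_not_or_not.mp hnew with h | h
          · exact absurd hjpos h
          · simpa using h
      · right
        refine ⟨j, hj, by simp; omega, hjpos, ?_, ?_⟩
        · rw [List.getElem_append_left hjl]; exact hjal
        · intro l hl hgt hlpos
          simp only [List.length_append, List.length_cons, List.length_nil] at hl
          by_cases hls : l < s.length
          · rw [List.getElem_append_left hls]; exact hmax l hls hgt hlpos
          · have : l = s.length := by omega
            subst this
            rw [List.getElem_concat_length rfl]
            rcases Decidable.not_and_iff_not_or_not.mp hnew with h | h
            · exact absurd hlpos h
            · simpa using h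

lemma pv_la_ge (s : List Char) (position : Int) :
    -1 ≤ (PySem.List.enumerate s 0).foldl (pvLStep position) (-1) := by
  rcases pv_la_spec s position with ⟨h, _⟩ | ⟨j, h, _⟩ <;> rw [h] <;> omega

-- slice s[a:b] contains an alphabetic char iff some index in [a, b) is alphabetic
lemma pv_slice_any_alpha (s : List Char) (a b : Int) (h0 : 0 ≤ a) (h0b : 0 ≤ b) :
    (PySem.List.slice s (some a) (some b)).any PySem.Chars.isalpha = true ↔
      ∃ i : Nat, a ≤ (i : Int) ∧ (i : Int) < b ∧ ∃ hi : i < s.length, PySem.Chars.isalpha s[i] = true := by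
  rw [PySem.List.slice_toNat s h0 h0b, List.any_eq_true]
  constructor
  · rintro ⟨x, hx, hax⟩
    obtain ⟨k, hk, rfl⟩ := List.getElem_of_mem hx
    have hk' := hk
    simp only [List.length_take, List.length_drop] at hk'
    refine ⟨a.toNat + k, by omega, by omega, by omega, ?_⟩
    rw [List.getElem_take, List.getElem_drop] at hax
    convert hax using 2
  · rintro ⟨i, hai, hib, hi, hal⟩
    have hlen : i - a.toNat < (List.take (b.toNat - a.toNat) (List.drop a.toNat s)).length := by
      simp only [List.length_take, List.length_drop]
      omega
    refine ⟨_, List.getElem_mem hlen, ?_⟩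
    rw [List.getElem_take, List.getElem_drop]
    have : a.toNat + (i - a.toNat) = i := by omega
    simp only [this]
    exact hal

-- 'last_alpha < p' decides 'no alphabetic char in text[p:position)'
lemma pv_la_decide (s : List Char) (position p : Int) (hp0 : 0 ≤ p) (hpp : p < position) :
    decide ((PySem.List.enumerate s 0).foldl (pvLStep position) (-1) < p)
      = !(PySem.List.slice s (some p) (some position)).any PySem.Chars.isalpha := by
  rcases pv_la_spec s position with ⟨h1, h2⟩ | ⟨j, hval, hjl, hjpos, hjal, hmax⟩
  · have hany : (PySem.List.slice s (some p) (some position)).any PySem.Chars.isalpha = false := by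
      rw [Bool.eq_false_iff]
      intro h
      obtain ⟨i, hpi, hib, hi, hal⟩ := (pv_slice_any_alpha s p position hp0 (by omega)).mp h
      rw [h2 i hi hib] at hal
      exact Bool.false_ne_true hal
    rw [h1, hany, decide_eq_true (by omega : (-1 : Int) < p)]
    rfl
  · rw [hval]
    by_cases hjp : (j : Int) < p
    · have hany : (PySem.List.slice s (some p) (some position)).any PySem.Chars.isalpha = false := by
        rw [Bool.eq_false_iff]
        intro h
        obtain ⟨i, hpi, hib, hi, hal⟩ := (pv_slice_any_alpha s p position hp0 (by omega)).mp h
        rw [hmax i hi (by omega) hib] at hal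
        exact Bool.false_ne_true hal
      rw [hany, decide_eq_true hjp]
      rfl
    · have hany : (PySem.List.slice s (some p) (some position)).any PySem.Chars.isalpha = true :=
        (pv_slice_any_alpha s p position hp0 (by omega)).mpr ⟨j, by omega, hjpos, hjl, hjal⟩
      rw [hany, decide_eq_false hjp]
      rfl

-- a flag loop that only ever lowers the flag computes 'init && all not-P'
lemma pv_foldl_lower {α : Type} (P : α → Bool) (l : List α) (init : Bool) :
    l.foldl (fun fl i => if P i then false else fl) init = (init && l.all (fun i => !P i)) := by
  induction l generalizing init with
  | nil => simp
  | cons x xs ih =>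
    rw [List.foldl_cons, List.all_cons]
    by_cases h : P x = true
    · rw [if_pos h, ih]; simp [h]
    · have h' : P x = false := by simpa using h
      rw [if_neg h, ih]; simp [h']

-- the 'last present element' fold, restarted at (some c)
lemma pv_opt_last (p : Char → Bool) (cs : List Char) (c : Char) :
    cs.foldl (fun acc c' => if p c' then some c' else acc) (some c)
      = some ((cs.foldl (fun acc c' => if p c' then some c' else acc) none).getD c) := by
  induction cs generalizing c with
  | nil => simp
  | cons x xs ih =>
    by_cases h : p x = true
    · simp [h, ih]
    · simp [h, ih]

-- a fold whose step overwrites the state on present elements equals g of the last present element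
lemma pv_flag_last {α : Type} (p : Char → Bool) (g : Char → α) (cs : List Char) (init : α) :
    cs.foldl (fun fl c' => if p c' then g c' else fl) init
      = (cs.foldl (fun acc c' => if p c' then some c' else acc) none).elim init g := by
  induction cs generalizing init with
  | nil => simp
  | cons x xs ih =>
    by_cases h : p x = true
    · rw [List.foldl_cons, List.foldl_cons, if_pos h, if_pos h, ih, pv_opt_last]
      cases xs.foldl (fun acc c' => if p c' then some c' else acc) none <;> simp
    · rw [List.foldl_cons, List.foldl_cons, if_neg h, if_neg h, ih]

-- B's sep_pos loop in 'last present element' form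
lemma pv_sep_last (d : PySem.Dict Char Int) (cs : List Char) (init : Int) :
    cs.foldl (fun acc c => match d.get? c with | some v => v | none => acc) init
      = (cs.foldl (fun acc c' => if (d.get? c').isSome then some c' else acc) none).elim init
          (fun c => (d.get? c).getD 0) := by
  have hmatch : (fun (acc : Int) (c : Char) => match d.get? c with | some v => v | none => acc)
      = fun acc c => if (d.get? c).isSome then (d.get? c).getD 0 else acc := by
    funext acc c
    cases d.get? c <;> rfl
  rw [hmatch]
  exact pv_flag_last (fun c => (d.get? c).isSome) (fun c => (d.get? c).getD 0) cs init

lemma pv_opt_none (p : Char → Bool) (cs : List Char) (h : ∀ c ∈ cs, p c = false) :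
    cs.foldl (fun acc c' => if p c' then some c' else acc) none = none := by
  induction cs with
  | nil => simp
  | cons x xs ih =>
    have hx := h x (by simp)
    simp [hx, ih (fun c hc => h c (by simp [hc]))]

lemma pv_opt_ne_none (p : Char → Bool) (cs : List Char) (c : Char) (hc : c ∈ cs) (hp : p c = true) :
    cs.foldl (fun acc c' => if p c' then some c' else acc) none ≠ none := by
  induction cs with
  | nil => simp at hc
  | cons x xs ih =>
    rcases List.mem_cons.mp hc with rfl | hc'
    · simp [hp, pv_opt_last]
    · by_cases hx : p x = true
      · simp [hx, pv_opt_last]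
      · simpa [hx] using ih hc'

lemma pv_opt_some_prop (p : Char → Bool) (cs : List Char) (c : Char)
    (h : cs.foldl (fun acc c' => if p c' then some c' else acc) none = some c) :
    c ∈ cs ∧ p c = true := by
  induction cs with
  | nil => simp at h
  | cons x xs ih =>
    by_cases hx : p x = true
    · rw [List.foldl_cons, if_pos hx, pv_opt_last] at h
      rcases ho : xs.foldl (fun acc c' => if p c' then some c' else acc) none with _ | d
      · rw [ho, Option.getD_none] at h
        rcases Option.some.inj h with rfl
        simp [hx]
      · rw [ho, Option.getD_some] at h
        rcases Option.some.inj h with rfl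
        obtain ⟨hmem, hpd⟩ := ih ho
        simp [hmem, hpd]
    · rw [List.foldl_cons, if_neg hx] at h
      obtain ⟨hmem, hpd⟩ := ih h
      exact ⟨by simp [hmem], hpd⟩

-- rfind.go: the result is -1 or a valid match position ≤ fuel
lemma pv_rfind_go_spec (s sub : List Char) (j : Nat) :
    PySem.Chars.rfind.go s sub j = -1 ∨
      (0 ≤ PySem.Chars.rfind.go s sub j ∧ PySem.Chars.rfind.go s sub j ≤ (j : Int) ∧
        sub <+: s.drop (PySem.Chars.rfind.go s sub j).toNat) := by
  induction j with
  | zero =>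
    by_cases h : sub <+: s
    · right
      rw [PySem.Chars.rfind.go]
      simp [List.isPrefixOf_iff_prefix, h]
    · left
      rw [PySem.Chars.rfind.go]
      simp [List.isPrefixOf_iff_prefix, h]
  | succ j ih =>
    rw [PySem.Chars.rfind.go]
    by_cases h : sub <+: s.drop (j + 1)
    · right
      rw [if_pos (by simpa [List.isPrefixOf_iff_prefix] using h)]
      refine ⟨by positivity, by push_cast; omega, by simpa using h⟩
    · rw [if_neg (by simpa [List.isPrefixOf_iff_prefix] using h)]
      rcases ih with h1 | ⟨h1, h2, h3⟩
      · left; exact h1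
      · right; exact ⟨h1, by push_cast; omega, h3⟩

-- rfind.go returns at least any match position ≤ fuel (maximality)
lemma pv_rfind_go_ge (s sub : List Char) (j i : Nat) (hij : i ≤ j)
    (h : sub <+: s.drop i) : (i : Int) ≤ PySem.Chars.rfind.go s sub j := by
  induction j with
  | zero =>
    have : i = 0 := by omega
    subst this
    rw [PySem.Chars.rfind.go]
    simp only [List.drop_zero] at h
    simp [List.isPrefixOf_iff_prefix, h]
  | succ j ih =>
    rw [PySem.Chars.rfind.go]
    by_cases hp : sub <+: s.drop (j + 1)
    · rw [if_pos (by simpa [List.isPrefixOf_iff_prefix] using hp)]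
      push_cast
      omega
    · rw [if_neg (by simpa [List.isPrefixOf_iff_prefix] using hp)]
      have hi : i ≤ j := by
        rcases Nat.lt_or_ge i (j + 1) with h' | h'
        · omega
        · exfalso
          have : i = j + 1 := by omega
          exact hp (this ▸ h)
      exact ih hi

-- rfind of a single character is the index of its last occurrence
lemma pv_rfind_eq_last (s : List Char) (c : Char) (j : Nat) (hj : j < s.length)
    (hget : s[j] = c) (hmax : ∀ l, (hl : l < s.length) → j < l → s[l] ≠ c) :
    PySem.Chars.rfind s [c] = (j : Int) := by
  have hpre : [c] <+: s.drop j := ⟨s.drop (j + 1), by rw [List.drop_eq_getElem_cons hj, hget]; rfl⟩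
  unfold PySem.Chars.rfind
  have hge := pv_rfind_go_ge s [c] s.length j (le_of_lt hj) hpre
  rcases pv_rfind_go_spec s [c] s.length with h | ⟨h1, _, h3⟩
  · rw [h] at hge; omega
  · set r := PySem.Chars.rfind.go s [c] s.length with hr
    obtain ⟨t, ht⟩ := h3
    have hrl : r.toNat < s.length := by
      by_contra hcon
      push_neg at hcon
      rw [List.drop_eq_nil_of_le hcon] at ht
      simp at ht
    have hdrop := List.drop_eq_getElem_cons hrl
    rw [← ht] at hdrop
    rw [List.singleton_append] at hdrop
    have hrc : s[r.toNat] = c := ((List.cons_eq_cons.mp hdrop).1).symm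
    by_cases hgt : j < r.toNat
    · exact absurd hrc (hmax r.toNat hrl hgt)
    · omega

-- A's big membership guard is 'no separator occurs in text'
lemma pv_big_iff (text : String) :
    ((!PySem.Str.isIn "[" text && !PySem.Str.isIn "(" text && !PySem.Str.isIn ":" text &&
      !PySem.Str.isIn "," text && !PySem.Str.isIn ";" text && !PySem.Str.isIn "=" text &&
      !PySem.Str.isIn "+" text && !PySem.Str.isIn "-" text && !PySem.Str.isIn "*" text &&
      !PySem.Str.isIn "/" text && !PySem.Str.isIn "%" text) = true)
      ↔ ∀ c ∈ pvSeps, PySem.Str.isIn (String.ofList [c]) text = false := by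
  simp only [pvSeps, List.mem_cons, List.not_mem_nil, or_false]
  constructor
  · intro h c hc
    simp only [Bool.and_eq_true, Bool.not_eq_true'] at h
    rcases hc with rfl | rfl | rfl | rfl | rfl | rfl | rfl | rfl | rfl | rfl | rfl <;> tauto
  · intro h
    simp only [Bool.and_eq_true, Bool.not_eq_true']
    exact ⟨⟨⟨⟨⟨⟨⟨⟨⟨⟨h '[' (by tauto), h '(' (by tauto)⟩, h ':' (by tauto)⟩, h ',' (by tauto)⟩,
      h ';' (by tauto)⟩, h '=' (by tauto)⟩, h '+' (by tauto)⟩, h '-' (by tauto)⟩,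
      h '*' (by tauto)⟩, h '/' (by tauto)⟩, h '%' (by tauto)⟩

-- the dict holds a separator iff it occurs in text
lemma pv_isSome_eq (text : String) (c : Char) (hc : c ∈ pvSeps) :
    (((PySem.List.enumerate text.toList 0).foldl pvDStep PySem.Dict.empty).get? c).isSome
      = PySem.Str.isIn (String.ofList [c]) text := by
  rcases pv_dict_spec text.toList c hc with ⟨hn, hnm⟩ | ⟨j, hj, hjl, hget, _⟩
  · rw [hn]
    simp only [Option.isSome_none]
    symm
    rw [Bool.eq_false_iff]
    intro h
    exact hnm ((pv_isIn_singleton text c).mp h)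
  · rw [hj]
    simp only [Option.isSome_some]
    exact ((pv_isIn_singleton text c).mpr (hget ▸ List.getElem_mem hjl)).symm

-- the index loop over [a, b) checks exactly the characters of the slice s[a:b]
lemma pv_inner_eq (s : List Char) (a b : Int) (h0 : 0 ≤ a) (hab : a < b) (hb : b ≤ (s.length : Int)) :
    (PySem.List.pyRange a b 1).foldl
        (fun flag i => if PySem.Chars.isalpha (PySem.List.pyGetD s i ' ') then false else flag) true
      = !(PySem.List.slice s (some a) (some b)).any PySem.Chars.isalpha := by
  rw [pv_foldl_lower, Bool.true_and, PySem.List.slice_toNat s h0 (by omega), Bool.eq_iff_iff]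
  simp only [List.all_eq_true, Bool.not_eq_true', Bool.not_eq_true, List.any_eq_false]
  constructor
  · intro h x hx
    obtain ⟨k, hk, rfl⟩ := List.getElem_of_mem hx
    have hklen : k < b.toNat - a.toNat := by
      have := hk
      simp only [List.length_take, List.length_drop] at this
      omega
    rw [List.getElem_take, List.getElem_drop]
    have hmem : ((a.toNat + k : Nat) : Int) ∈ PySem.List.pyRange a b 1 := by
      rw [PySem.List.mem_pyRange_one]
      constructor <;> [omega; omega]
    have hh := h _ hmem
    rw [PySem.List.pyGetD_eq_getElem _ _ (by omega) (by push_cast; omega)] at hh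
    simp only [Int.toNat_natCast] at hh
    exact hh
  · intro h i hi
    rw [PySem.List.mem_pyRange_one] at hi
    rw [PySem.List.pyGetD_eq_getElem _ _ (by omega) (by omega)]
    have hlen : i.toNat - a.toNat < (List.take (b.toNat - a.toNat) (List.drop a.toNat s)).length := by
      simp only [List.length_take, List.length_drop]
      omega
    have hh := h _ (List.getElem_mem hlen)
    rw [List.getElem_take, List.getElem_drop] at hh
    simp only [show a.toNat + (i.toNat - a.toNat) = i.toNat from by omega] at hh
    exact hh

-- the value A computes for a present separator, inside Pre_
lemma pv_step_eq (text : String) (position : Int) (c : Char)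
    (hc : PySem.Str.isIn (String.ofList [c]) text = true)
    (hpos : position ≤ (text.toList.length : Int)) :
    pvAStep text position c
      = (if position ≤ PySem.Str.rfind text (String.ofList [c]) then false
         else !(PySem.List.slice text.toList (some (PySem.Str.rfind text (String.ofList [c])))
                  (some position)).any PySem.Chars.isalpha) := by
  have hmem : c ∈ text.toList := (pv_isIn_singleton text c).mp hc
  obtain ⟨i, hi, hgeti⟩ := List.getElem_of_mem hmem
  have hpre : [c] <+: text.toList.drop i :=
    ⟨text.toList.drop (i + 1), by rw [List.drop_eq_getElem_cons hi, hgeti]; rfl⟩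
  have hge0 : (0 : Int) ≤ PySem.Chars.rfind text.toList [c] := by
    unfold PySem.Chars.rfind
    have := pv_rfind_go_ge text.toList [c] text.toList.length i (le_of_lt hi) hpre
    omega
  have hge : 0 ≤ PySem.Str.rfind text (String.ofList [c]) := by simpa using hge0
  unfold pvAStep
  by_cases hle : position ≤ PySem.Str.rfind text (String.ofList [c])
  · rw [if_pos hle, if_pos hle]
  · push_neg at hle
    rw [if_neg (by omega), if_neg (by omega)]
    exact pv_inner_eq text.toList _ position hge hle hpos

-- ===== VERDICT (by name: the statement is the Claim_ definition above) =====
theorem num_left_of_spec : Claim_equal_num_left_of := by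
  intro text position _ hpre
  unfold Spec_num_left_of num_left_of
  simp only [num_left_of_alt, pv_fold_pair]
  rw [pv_sep_last]
  have hopt : pvSeps.foldl
        (fun acc c' => if (((PySem.List.enumerate text.toList 0).foldl pvDStep PySem.Dict.empty).get? c').isSome
          then some c' else acc) none
      = pvSeps.foldl (fun acc c' => if PySem.Str.isIn (String.ofList [c']) text then some c' else acc) none := by
    refine PySem.List.foldl_congr_mem _ _ _ _ ?_
    intro acc c hc
    show (if (((PySem.List.enumerate text.toList 0).foldl pvDStep PySem.Dict.empty).get? c).isSome
            then some c else acc)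
        = (if PySem.Str.isIn (String.ofList [c]) text then some c else acc)
    rw [pv_isSome_eq text c hc]
  rw [hopt]
  set p : Char → Bool := fun c => PySem.Str.isIn (String.ofList [c]) text with hp
  by_cases hall : ∀ c ∈ pvSeps, p c = false
  · rw [if_pos ((pv_big_iff text).mpr hall), pv_opt_none p pvSeps hall]
    have hge := pv_la_ge text.toList position
    simp only [Option.elim_none]
    symm
    rw [Bool.and_eq_false_iff]
    right
    rw [decide_eq_false_iff_not]
    omega
  · rw [if_neg (fun h => hall ((pv_big_iff text).mp h))]
    push_neg at hall
    obtain ⟨c0, hc0, hpc0⟩ := hall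
    have hne := pv_opt_ne_none p pvSeps c0 hc0 (by simpa using hpc0)
    rcases ho : pvSeps.foldl (fun acc c' => if p c' then some c' else acc) none with _ | c
    · exact absurd ho hne
    · obtain ⟨hcs, hpc⟩ := pv_opt_some_prop p pvSeps c ho
      have hmem : c ∈ text.toList := (pv_isIn_singleton text c).mp hpc
      have hpos : position ≤ (text.toList.length : Int) := by
        rcases hpre with h | h
        · exact h
        · exact absurd hmem (h c hcs)
      rcases pv_dict_spec text.toList c hcs with ⟨_, hnm⟩ | ⟨j, hj, hjl, hget, hmax⟩
      · exact absurd hmem hnm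
      · have hrf : PySem.Str.rfind text (String.ofList [c]) = (j : Int) := by
          have := pv_rfind_eq_last text.toList c j hjl hget hmax
          simpa using this
        rw [pv_flag_last p (pvAStep text position) pvSeps true, ho]
        simp only [Option.elim_some]
        rw [pv_step_eq text position c hpc hpos, hrf]
        simp only [hj, Option.getD_some]
        by_cases hle : position ≤ (j : Int)
        · rw [if_pos hle]
          simp only [decide_eq_false (show ¬ (j : Int) < position by omega), Bool.false_and]
        · push_neg at hle
          rw [if_neg (by omega)]
          simp only [decide_eq_true hle, Bool.true_and]
          exact (pv_la_decide text.toList position (j : Int) (by omega) hle).symm
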